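-- pv_equiv track=rewrite | github.com/vkotek/cs50p4 | restaurants/management/commands/_private.py | trim_junk
-- ===== SOURCE A (Python) =====
-- def trim_junk(text):
--     def find_last_letter(text):
--         last_letter = 0
--         for i, letter in enumerate(text):
--             if letter.isalpha():
--                 last_letter = i + 1
--         return last_letter
--
--     return text[:find_last_letter(text)]
-- ===== SOURCE B (Python) =====
-- def trim_junk(text):
--     i = len(text)
--     while i > 0 and not text[i - 1].isalpha():
--         i -= 1
--     return text[:i]
-- ===== Notes on version B (the rewrite author's own statement) =====
-- stated objective: faster
-- what changed: Replaces A's full forward pass that remembers the index after the last alphabetic character with a backward while-loop that stops at the first alphabetic character from the end, then slices once.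
import Mathlib
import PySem

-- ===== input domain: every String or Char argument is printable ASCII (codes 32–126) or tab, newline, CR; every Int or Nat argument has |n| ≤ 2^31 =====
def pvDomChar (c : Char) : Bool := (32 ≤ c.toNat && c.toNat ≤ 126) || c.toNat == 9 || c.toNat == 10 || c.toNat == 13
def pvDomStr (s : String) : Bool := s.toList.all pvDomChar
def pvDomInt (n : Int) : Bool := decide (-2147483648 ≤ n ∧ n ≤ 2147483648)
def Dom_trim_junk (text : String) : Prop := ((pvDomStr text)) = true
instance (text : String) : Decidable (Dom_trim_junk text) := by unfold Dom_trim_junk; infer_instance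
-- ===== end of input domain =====

-- B replaces A's full forward scan (tracking the index after the last letter) by a backward
-- while-loop that stops at the first letter from the end; return value equivalence is proved.

-- ===== PORT A =====
-- find_last_letter: forward fold over enumerate(text), remembering i+1 at each alphabetic char
def trim_junk (text : String) : String :=
  let last_letter : Int :=
    (PySem.List.enumerate text.toList 0).foldl
      (fun acc p => if PySem.Chars.isalpha p.2 then p.1 + 1 else acc) 0
  PySem.Str.slice text none (some last_letter)

-- ===== PORT B =====
-- the while-loop of Source B: while i > 0 and not text[i-1].isalpha(): i -= 1
-- (text[i-1] is always in range here — the loop guarantees 1 ≤ i ≤ len — so getD is exact)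
def trimLoopB (l : List Char) : Nat → Nat
  | 0 => 0
  | i + 1 => if !(PySem.Chars.isalpha (l.getD i ' ')) then trimLoopB l i else i + 1

def trim_junk_alt (text : String) : String :=
  PySem.Str.slice text none (some ((trimLoopB text.toList text.toList.length : Nat) : Int))

-- ===== PRECONDITION & SPEC =====
def Spec_trim_junk (text : String) (out : String) : Prop := out = trim_junk_alt text
instance (text : String) (out : String) : Decidable (Spec_trim_junk text out) := by unfold Spec_trim_junk; infer_instance

-- ===== CLAIM (what is proved, stated in full; the proofs are below) =====
def Claim_equal_trim_junk : Prop := ∀ (text : String), Dom_trim_junk text → Spec_trim_junk text (trim_junk text)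

-- ===== LEMMAS AND PROOFS =====

-- the backward loop never looks past index i-1, so an appended element is irrelevant
theorem trimLoopB_append (l : List Char) (c : Char) :
    ∀ i, i ≤ l.length → trimLoopB (l ++ [c]) i = trimLoopB l i := by
  intro i
  induction i with
  | zero => intro _; rfl
  | succ j ih =>
    intro h
    have hj : j < l.length := by omega
    simp only [trimLoopB, List.getD_append _ _ _ _ hj]
    rw [ih (by omega)]

theorem forward_eq_backward (l : List Char) :
    (PySem.List.enumerate l 0).foldl
      (fun acc p => if PySem.Chars.isalpha p.2 then p.1 + 1 else acc) 0
      = ((trimLoopB l l.length : Nat) : Int) := by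
  induction l using List.reverseRecOn with
  | nil => rfl
  | append_singleton l c ih =>
    rw [PySem.List.enumerate_append, List.foldl_append, ih]
    have hgetD : (l ++ [c]).getD l.length ' ' = c := by
      simp [List.getD]
    simp only [PySem.List.enumerate_cons, PySem.List.enumerate_nil, List.length_append,
      List.length_singleton, List.foldl_cons, List.foldl_nil, trimLoopB, hgetD]
    by_cases h : PySem.Chars.isalpha c
    · simp [h]
    · simp [h, trimLoopB_append l c l.length le_rfl]

-- ===== VERDICT (by name: the statement is the Claim_ definition above) =====
theorem trim_junk_spec : Claim_equal_trim_junk := by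
  intro text _
  unfold Spec_trim_junk trim_junk trim_junk_alt
  rw [forward_eq_backward]
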